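-- pv_equiv track=rewrite | github.com/pygfx/pygfx | pygfx/materials/_base.py | _get_alpha_config_options
-- ===== SOURCE A (Python) =====
-- def _get_alpha_config_options(
--     method: str, keys: list, default_dict: dict, given_dict: dict
-- ):
--     err_preamble = f"material.alpha_config for method {method!r}"
--     assert isinstance(given_dict, dict)
--     source_dict = given_dict.copy()
--     result_dict = {"method": method, **default_dict}
--     for key in ["method", "mode"]:
--         source_dict.pop(key, None)
--     try:
--         for key in keys:
--             if key in source_dict:
--                 result_dict[key] = source_dict.pop(key)
--     except KeyError as err:
--         raise KeyError(f"{err_preamble} is missing field {err.args[0]!r}") from None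
--     if source_dict:
--         raise ValueError(f"{err_preamble} contains invalid fields: {source_dict!r}")
--     return result_dict
-- ===== SOURCE B (Python) =====
-- def _get_alpha_config_options(
--     method: str, keys: list, default_dict: dict, given_dict: dict
-- ):
--     err_preamble = f"material.alpha_config for method {method!r}"
--     assert isinstance(given_dict, dict)
--     allowed = set(keys)
--     # one pass over given_dict: classify each field as recognised or invalid
--     given = {}
--     extras = {}
--     for k, v in given_dict.items():
--         if k in ("method", "mode"):
--             continue
--         (given if k in allowed else extras)[k] = v
--     if extras:
--         raise ValueError(f"{err_preamble} contains invalid fields: {extras!r}")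
--     # defaults overridden by given values, then the remaining given-only keys
--     result = {"method": method}
--     for k, v in default_dict.items():
--         result[k] = given.get(k, v)
--     for k in keys:
--         if k in given and k not in result:
--             result[k] = given[k]
--     return result
-- ===== Notes on version B (the rewrite author's own statement) =====
-- stated objective: simpler
-- what changed: Instead of copying given_dict and consuming it by popping while scanning the allowed-key list (validity = whatever is left over), B makes one classifying pass over given_dict against a prebuilt set(keys), splitting it into recognised values and invalid extras up front, then assembles the result from the defaults (overridden by recognised values) plus the remaining recognised keys in keys order.
import Mathlib
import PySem

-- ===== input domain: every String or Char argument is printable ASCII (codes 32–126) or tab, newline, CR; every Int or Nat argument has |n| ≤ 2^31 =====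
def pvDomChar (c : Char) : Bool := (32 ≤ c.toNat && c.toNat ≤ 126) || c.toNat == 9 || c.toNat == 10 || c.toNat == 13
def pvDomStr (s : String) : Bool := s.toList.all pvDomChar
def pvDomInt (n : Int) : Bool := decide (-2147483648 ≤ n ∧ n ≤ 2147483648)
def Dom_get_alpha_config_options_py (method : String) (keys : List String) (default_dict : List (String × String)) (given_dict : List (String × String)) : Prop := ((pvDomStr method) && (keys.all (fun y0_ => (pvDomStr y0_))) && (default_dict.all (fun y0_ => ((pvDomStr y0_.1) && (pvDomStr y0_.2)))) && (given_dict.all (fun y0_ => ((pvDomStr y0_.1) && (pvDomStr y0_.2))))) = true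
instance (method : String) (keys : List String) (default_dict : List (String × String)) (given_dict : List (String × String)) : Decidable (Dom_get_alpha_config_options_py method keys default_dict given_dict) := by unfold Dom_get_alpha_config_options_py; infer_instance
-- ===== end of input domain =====

-- B replaces A's destructive pop-while-scanning-keys validation by a single classifying
-- pass over given_dict against set(keys), then assembles the result; objective: simpler.


-- ===== PORT A =====
-- body of A's 'for key in keys: if key in source_dict: result_dict[key] = source_dict.pop(key)'
-- (state = (result_dict, source_dict)); A's KeyError branch is unreachable (pop only after the membership test)
def pvA_step (st : PySem.Dict String String × PySem.Dict String String) (key : String) :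
    PySem.Dict String String × PySem.Dict String String :=
  if st.2.contains key then
    match st.2.pop? key with
    | some (v, s') => (st.1.insert key v, s')
    | none => st
  else st

def get_alpha_config_options_py (method : String) (keys : List String) (default_dict : List (String × String)) (given_dict : List (String × String)) : List (String × String) :=
  -- source_dict = given_dict.copy()
  let source0 : PySem.Dict String String := PySem.Dict.ofList given_dict
  -- result_dict = {"method": method, **default_dict}
  let result0 : PySem.Dict String String :=
    default_dict.foldl (fun d p => d.insert p.1 p.2) (PySem.Dict.empty.insert "method" method)
  -- for key in ["method", "mode"]: source_dict.pop(key, None)   (the returned value is discarded: removal)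
  let source1 := (["method", "mode"] : List String).foldl (fun s k => s.erase k) source0
  let st := keys.foldl pvA_step (result0, source1)
  -- 'if source_dict: raise ValueError(...)': inputs with leftover fields are excluded by Pre_
  st.1.items

-- ===== PORT B =====
-- body of B's classifying pass over given_dict.items() (state = (given, extras))
def pvB_classify (allowed : PySem.Set String)
    (st : PySem.Dict String String × PySem.Dict String String) (p : String × String) :
    PySem.Dict String String × PySem.Dict String String :=
  if p.1 == "method" || p.1 == "mode" then st
  else if PySem.Set.contains allowed p.1 then (st.1.insert p.1 p.2, st.2)
  else (st.1, st.2.insert p.1 p.2)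

-- body of B's 'for k in keys: if k in given and k not in result: result[k] = given[k]'
def pvB_fill (gvn : PySem.Dict String String) (d : PySem.Dict String String) (k : String) :
    PySem.Dict String String :=
  if gvn.contains k && !(d.contains k) then
    match gvn.get? k with
    | some v => d.insert k v
    | none => d
  else d

def get_alpha_config_options_py_alt (method : String) (keys : List String) (default_dict : List (String × String)) (given_dict : List (String × String)) : List (String × String) :=
  let allowed : PySem.Set String := PySem.Set.ofList keys
  let cls := (PySem.Dict.ofList given_dict).items.foldl (pvB_classify allowed)
      (PySem.Dict.empty, PySem.Dict.empty)
  -- 'if extras: raise ValueError(...)': inputs with a non-empty cls.2 are excluded by Pre_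
  -- result = {"method": method}; for k, v in default_dict.items(): result[k] = given.get(k, v)
  let result0 : PySem.Dict String String :=
    default_dict.foldl (fun d p => d.insert p.1 (cls.1.getD p.1 p.2))
      (PySem.Dict.empty.insert "method" method)
  (keys.foldl (pvB_fill cls.1) result0).items

-- ===== PRECONDITION & SPEC =====
-- Pre_ excludes exactly the inputs with an invalid field (a given_dict key other than
-- "method"/"mode" that is not in keys), on which Python A (and Python B) raises ValueError.
def Pre_get_alpha_config_options_py (method : String) (keys : List String) (default_dict : List (String × String)) (given_dict : List (String × String)) : Prop :=
  ∀ p ∈ given_dict, p.1 = "method" ∨ p.1 = "mode" ∨ p.1 ∈ keys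
instance (method : String) (keys : List String) (default_dict : List (String × String)) (given_dict : List (String × String)) : Decidable (Pre_get_alpha_config_options_py method keys default_dict given_dict) := by unfold Pre_get_alpha_config_options_py; infer_instance
def pvWitness_get_alpha_config_options_py : String × List String × (List (String × String)) × (List (String × String)) :=
  ("weighted", ["alpha"], [("alpha", "1")], [("alpha", "0"), ("mode", "m")])

def Spec_get_alpha_config_options_py (method : String) (keys : List String) (default_dict : List (String × String)) (given_dict : List (String × String)) (out : List (String × String)) : Prop := out = get_alpha_config_options_py_alt method keys default_dict given_dict
instance (method : String) (keys : List String) (default_dict : List (String × String)) (given_dict : List (String × String)) (out : List (String × String)) : Decidable (Spec_get_alpha_config_options_py method keys default_dict given_dict out) := by unfold Spec_get_alpha_config_options_py; infer_instance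

-- ===== CLAIM (what is proved, stated in full; the proofs are below) =====
def Claim_equal_get_alpha_config_options_py : Prop := ∀ (method : String) (keys : List String) (default_dict : List (String × String)) (given_dict : List (String × String)), Dom_get_alpha_config_options_py method keys default_dict given_dict → Pre_get_alpha_config_options_py method keys default_dict given_dict → Spec_get_alpha_config_options_py method keys default_dict given_dict (get_alpha_config_options_py method keys default_dict given_dict)

-- ===== LEMMAS AND PROOFS =====

-- overwriting view of A's pending updates: a result entry whose key is still in the not yet
-- consumed source s and is a recognised given value will end up holding that given value
def pvOw (gvn s : PySem.Dict String String) (p : String × String) : String × String :=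
  if s.contains p.1 && gvn.contains p.1 then (p.1, gvn.getD p.1 p.2) else p

theorem pvOw_fst (gvn s : PySem.Dict String String) (p : String × String) :
    (pvOw gvn s p).1 = p.1 := by
  unfold pvOw; split <;> rfl

theorem pvOw_of_contains_false (gvn s : PySem.Dict String String) (p : String × String)
    (h : s.contains p.1 = false) : pvOw gvn s p = p := by
  unfold pvOw; rw [h]; simp

theorem pv_contains_of_rel (gvn s rA rB : PySem.Dict String String)
    (h : rB.items = rA.items.map (pvOw gvn s)) (k : String) :
    rB.contains k = rA.contains k := by
  rw [PySem.Dict.contains, PySem.Dict.contains, h, List.any_map]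
  congr 1
  funext p
  simp [Function.comp, pvOw_fst]

theorem pv_contains_of_mem_items (d : PySem.Dict String String) (p : String × String)
    (h : p ∈ d.items) : d.contains p.1 = true := by
  simp only [PySem.Dict.contains, List.any_eq_true]
  exact ⟨p, h, by simp⟩

theorem pv_find_filter (l : List (String × String)) (a k : String) :
    (l.filter (fun p => !(p.1 == a))).find? (fun p => p.1 == k)
      = if k = a then none else l.find? (fun p => p.1 == k) := by
  induction l with
  | nil => simp
  | cons p t ih =>
    by_cases hpa : p.1 = a
    · by_cases hka : k = a
      · simp [List.filter_cons, hpa, hka, ih]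
      · have hpk : ¬ (p.1 = k) := fun e => hka (by rw [← e, hpa])
        have hak : (a == k) = false := beq_eq_false_iff_ne.mpr (fun h => hka h.symm)
        simp [List.filter_cons, hpa, hka, hpk, List.find?_cons, hak, ih]
    · by_cases hpk : p.1 = k
      · have hka : ¬ (k = a) := fun h => hpa (by rw [hpk, h])
        simp [List.filter_cons, hpa, hpk, hka]
      · simp [List.filter_cons, hpa, hpk, ih]

theorem pv_get?_erase (d : PySem.Dict String String) (a k : String) :
    (d.erase a).get? k = if k = a then none else d.get? k := by
  simp only [PySem.Dict.erase, PySem.Dict.get?, pv_find_filter]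
  split <;> rfl

theorem pv_contains_erase (d : PySem.Dict String String) (a k : String) :
    (d.erase a).contains k = if k = a then false else d.contains k := by
  rw [PySem.Dict.contains_eq_isSome_get?, PySem.Dict.contains_eq_isSome_get?, pv_get?_erase]
  split <;> rfl

theorem pv_get?_isSome_of_contains (d : PySem.Dict String String) (k : String)
    (h : d.contains k = true) : ∃ v, d.get? k = some v := by
  rw [PySem.Dict.contains_eq_isSome_get?] at h
  exact Option.isSome_iff_exists.mp h

-- characterisation of B's classifying pass: its 'given' dict looks up exactly the
-- recognised (non-"method"/"mode", allowed) keys among the scanned items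
theorem pv_classify_get? (keys : List String) (L : List (String × String))
    (hnd : (L.map Prod.fst).Nodup) (k : String) :
    ∀ acc : PySem.Dict String String × PySem.Dict String String,
      ((L.foldl (pvB_classify (PySem.Set.ofList keys)) acc).1).get? k
        = if ¬(k = "method" ∨ k = "mode") ∧ k ∈ keys then
            (match L.find? (fun p => p.1 == k) with
             | some p => some p.2
             | none => acc.1.get? k)
          else acc.1.get? k := by
  induction L with
  | nil => intro acc; split <;> rfl
  | cons p t ih =>
    intro acc
    simp only [List.map_cons, List.nodup_cons] at hnd
    rw [List.foldl_cons, ih hnd.2]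
    have hstep : ((pvB_classify (PySem.Set.ofList keys) acc p).1).get? k
        = if p.1 = k ∧ ¬(k = "method" ∨ k = "mode") ∧ k ∈ keys then some p.2
          else acc.1.get? k := by
      unfold pvB_classify
      by_cases hm : p.1 = "method" ∨ p.1 = "mode"
      · have hb : (p.1 == "method" || p.1 == "mode") = true := by
          rcases hm with h | h <;> simp [h]
        rw [if_pos hb, if_neg (fun hc => hc.2.1 (hc.1 ▸ hm))]
      · have hb : (p.1 == "method" || p.1 == "mode") = false := by
          simp only [Bool.or_eq_false_iff, beq_eq_false_iff_ne]
          exact ⟨fun h => hm (Or.inl h), fun h => hm (Or.inr h)⟩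
        rw [if_neg (show ¬ ((p.1 == "method" || p.1 == "mode") = true) from by
          rw [hb]; exact Bool.false_ne_true)]
        by_cases hal : p.1 ∈ keys
        · have hc : PySem.Set.contains (PySem.Set.ofList keys) p.1 = true := by
            simp only [PySem.Set.contains, List.contains_eq_any_beq, List.any_eq_true]
            exact ⟨p.1, (PySem.Set.mem_ofList keys p.1).mpr hal, by simp⟩
          rw [if_pos hc]
          by_cases hpk : p.1 = k
          · subst hpk
            rw [if_pos ⟨rfl, hm, hal⟩]
            exact PySem.Dict.get?_insert_self _ _ _
          · rw [if_neg (fun h => hpk h.1)]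
            exact PySem.Dict.get?_insert_of_ne _ _ (fun h : k = p.1 => hpk h.symm)
        · have hc : PySem.Set.contains (PySem.Set.ofList keys) p.1 = false := by
            simp only [PySem.Set.contains, List.contains_eq_any_beq, List.any_eq_false]
            intro x hx
            simp only [beq_iff_eq]
            intro he
            exact hal (he ▸ (PySem.Set.mem_ofList keys x).mp hx)
          rw [if_neg (show ¬ (PySem.Set.contains (PySem.Set.ofList keys) p.1 = true) from by
            rw [hc]; exact Bool.false_ne_true)]
          rw [if_neg (fun h => hal (by rw [h.1]; exact h.2.2))]
    by_cases hp : ¬(k = "method" ∨ k = "mode") ∧ k ∈ keys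
    · rw [if_pos hp, if_pos hp]
      by_cases hpk : p.1 = k
      · have hfind : t.find? (fun q => q.1 == k) = none := by
          apply List.find?_eq_none.mpr
          intro q hq
          simp only [beq_iff_eq]
          intro he
          have hq1 : q.1 ∈ List.map Prod.fst t := List.mem_map_of_mem hq
          exact hnd.1 (by rw [hpk, ← he]; exact hq1)
        rw [List.find?_cons_of_pos (by simp [hpk])]
        simp only [hfind, hstep]
        rw [if_pos ⟨hpk, hp⟩]
      · rw [List.find?_cons_of_neg (by simp [hpk])]
        cases hft : t.find? (fun q => q.1 == k) with
        | some q => rfl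
        | none =>
          simp only [hstep]
          rw [if_neg (fun h => hpk h.1)]
    · rw [if_neg hp, if_neg hp, hstep, if_neg (fun h => hp h.2)]

-- a key k with pvOw's rewrite pair: under gvn ⊆ s1 the pair (k, x) rewrites to (k, gvn.get(k, x))
theorem pvOw_mk (gvn s1 : PySem.Dict String String)
    (hsub : ∀ k, gvn.contains k = true → s1.contains k = true) (k : String) (x : String) :
    pvOw gvn s1 (k, x) = (k, gvn.getD k x) := by
  unfold pvOw
  by_cases hg : gvn.contains k = true
  · simp [hsub k hg, hg]
  · have hg' : gvn.contains k = false := Bool.eq_false_iff.mpr hg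
    have hnone : gvn.get? k = none := (PySem.Dict.get?_eq_none_iff_contains gvn k).mpr hg'
    simp [hg', PySem.Dict.getD_eq_get?_getD, hnone]

-- B's defaults pass tracks A's '{"method": method, **default_dict}' through pvOw
theorem pv_default (gvn s1 : PySem.Dict String String)
    (hsub : ∀ k, gvn.contains k = true → s1.contains k = true)
    (l : List (String × String)) :
    ∀ (dA dB : PySem.Dict String String),
      dB.items = dA.items.map (pvOw gvn s1) →
      (l.foldl (fun d p => d.insert p.1 (gvn.getD p.1 p.2)) dB).items
        = (l.foldl (fun d p => d.insert p.1 p.2) dA).items.map (pvOw gvn s1) := by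
  induction l with
  | nil => intro dA dB h; exact h
  | cons p t ih =>
    intro dA dB h
    rw [List.foldl_cons, List.foldl_cons]
    apply ih
    have hcB : dB.contains p.1 = dA.contains p.1 := pv_contains_of_rel _ _ _ _ h p.1
    by_cases hc : dA.contains p.1 = true
    · rw [PySem.Dict.items_insert_of_contains _ _ (hcB ▸ hc),
          PySem.Dict.items_insert_of_contains _ _ hc, h, List.map_map, List.map_map]
      apply List.map_congr_left
      intro q hq
      simp only [Function.comp]
      by_cases hqp : q.1 = p.1
      · rw [if_pos (by simp [pvOw_fst, hqp]), if_pos (by simp [hqp]), pvOw_mk gvn s1 hsub]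
      · rw [if_neg (by simp [pvOw_fst, hqp]), if_neg (by simp [hqp])]
    · have hc' : dA.contains p.1 = false := Bool.eq_false_iff.mpr hc
      rw [PySem.Dict.items_insert_of_not_contains _ _ (hcB ▸ hc'),
          PySem.Dict.items_insert_of_not_contains _ _ hc', h, List.map_append]
      simp [pvOw_mk gvn s1 hsub]

-- the main simulation: A's pop-and-insert scan over keys against B's fill pass,
-- related by pvOw on the still-unconsumed source
theorem pv_loop (gvn : PySem.Dict String String) (rem : List String) :
    ∀ (rA s rB : PySem.Dict String String),
      rB.items = rA.items.map (pvOw gvn s) →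
      rA.keys.Nodup →
      (∀ k, gvn.contains k = true → s.contains k = false → rA.contains k = true) →
      (∀ k, s.contains k = true → gvn.contains k = true → s.get? k = gvn.get? k) →
      (∀ k ∈ rem, s.contains k = true → gvn.contains k = true) →
      (rem.foldl (pvB_fill gvn) rB).items
        = (rem.foldl pvA_step (rA, s)).1.items.map (pvOw gvn (rem.foldl pvA_step (rA, s)).2) ∧
      (∀ k, (rem.foldl pvA_step (rA, s)).2.contains k = true → s.contains k = true) ∧
      (∀ k ∈ rem, (rem.foldl pvA_step (rA, s)).2.contains k = false) := by
  induction rem with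
  | nil =>
    intro rA s rB h hnodA hC1 hC2 hC4
    exact ⟨h, fun k hk => hk, by simp⟩
  | cons k0 t ih =>
    intro rA s rB h hnodA hC1 hC2 hC4
    rw [List.foldl_cons, List.foldl_cons]
    have hcrB : ∀ k, rB.contains k = rA.contains k := pv_contains_of_rel _ _ _ _ h
    by_cases hs : s.contains k0 = true
    · -- A pops k0 and writes it into the result
      obtain ⟨v, hv⟩ := pv_get?_isSome_of_contains s k0 hs
      have hg : gvn.contains k0 = true := hC4 k0 (by simp) hs
      have hgv : gvn.get? k0 = some v := by rw [← hC2 k0 hs hg]; exact hv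
      have hstepA : pvA_step (rA, s) k0 = (rA.insert k0 v, s.erase k0) := by
        simp [pvA_step, hs, PySem.Dict.pop?, hv]
      rw [hstepA]
      have herase_c : ∀ k, (s.erase k0).contains k = if k = k0 then false else s.contains k :=
        fun k => pv_contains_erase s k0 k
      have hC1' : ∀ k, gvn.contains k = true → (s.erase k0).contains k = false →
          (rA.insert k0 v).contains k = true := by
        intro k hgk hsk
        rw [PySem.Dict.contains_insert]
        by_cases hk : k = k0
        · simp [hk]
        · rw [herase_c k, if_neg hk] at hsk
          simp [hC1 k hgk hsk]
      have hC2' : ∀ k, (s.erase k0).contains k = true → gvn.contains k = true →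
          (s.erase k0).get? k = gvn.get? k := by
        intro k hsk hgk
        have hk : ¬ (k = k0) := by
          intro he; rw [herase_c k, if_pos he] at hsk; exact absurd hsk (by simp)
        rw [pv_get?_erase, if_neg hk]
        rw [herase_c k, if_neg hk] at hsk
        exact hC2 k hsk hgk
      have hC4' : ∀ k ∈ t, (s.erase k0).contains k = true → gvn.contains k = true := by
        intro k hk hsk
        by_cases he : k = k0
        · exact he ▸ hg
        · rw [herase_c k, if_neg he] at hsk
          exact hC4 k (by simp [hk]) hsk
      by_cases hcA : rA.contains k0 = true
      · -- result already has k0: A overwrites in place, B's fill skips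
        have hstepB : pvB_fill gvn rB k0 = rB := by
          simp [pvB_fill, hcrB k0, hcA]
        rw [hstepB]
        have hrel' : rB.items = (rA.insert k0 v).items.map (pvOw gvn (s.erase k0)) := by
          rw [PySem.Dict.items_insert_of_contains _ _ hcA, List.map_map, h]
          apply List.map_congr_left
          intro q hq
          simp only [Function.comp_apply]
          by_cases hqk : q.1 = k0
          · rw [if_pos (by simp [hqk] : (q.1 == k0) = true)]
            have h2 : pvOw gvn (s.erase k0) (k0, v) = (k0, v) := by
              apply pvOw_of_contains_false
              rw [herase_c k0]; simp
            rw [h2]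
            unfold pvOw
            rw [hqk, hs, hg]
            simp [PySem.Dict.getD_eq_get?_getD, hgv]
          · rw [if_neg (by simp [hqk])]
            unfold pvOw
            rw [herase_c q.1, if_neg hqk]
        obtain ⟨h1, h2, h3⟩ := ih (rA.insert k0 v) (s.erase k0) rB hrel'
          (PySem.Dict.nodup_keys_insert _ _ _ hnodA) hC1' hC2' hC4'
        refine ⟨h1, ?_, ?_⟩
        · intro k hk
          have := h2 k hk
          rw [herase_c k] at this
          by_cases he : k = k0
          · exact he ▸ hs
          · rwa [if_neg he] at this
        · intro k hk
          rcases List.mem_cons.mp hk with he | ht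
          · cases hout : ((t.foldl pvA_step (rA.insert k0 v, s.erase k0)).2).contains k with
            | false => rfl
            | true =>
              have h5 := h2 k hout
              rw [herase_c k, if_pos he] at h5
              exact absurd h5 (by simp)
          · exact h3 k ht
      · -- k0 is new: both append (k0, v)
        have hcA' : rA.contains k0 = false := Bool.eq_false_iff.mpr hcA
        have hstepB : pvB_fill gvn rB k0 = rB.insert k0 v := by
          simp [pvB_fill, hcrB k0, hcA', hg, hgv]
        rw [hstepB]
        have hrel' : (rB.insert k0 v).items
            = (rA.insert k0 v).items.map (pvOw gvn (s.erase k0)) := by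
          rw [PySem.Dict.items_insert_of_not_contains _ _ ((hcrB k0).trans hcA'),
              PySem.Dict.items_insert_of_not_contains _ _ hcA', List.map_append, h]
          have htail : pvOw gvn (s.erase k0) (k0, v) = (k0, v) := by
            apply pvOw_of_contains_false
            rw [herase_c k0]; simp
          rw [show ([(k0, v)] : List (String × String)).map (pvOw gvn (s.erase k0))
                = [(k0, v)] by simp [htail]]
          congr 1
          apply List.map_congr_left
          intro q hq
          have hqk : ¬ (q.1 = k0) := by
            intro he
            exact absurd (he ▸ pv_contains_of_mem_items rA q hq) (by simp [hcA'])
          unfold pvOw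
          rw [herase_c q.1, if_neg hqk]
        obtain ⟨h1, h2, h3⟩ := ih (rA.insert k0 v) (s.erase k0) (rB.insert k0 v) hrel'
          (PySem.Dict.nodup_keys_insert _ _ _ hnodA) hC1' hC2' hC4'
        refine ⟨h1, ?_, ?_⟩
        · intro k hk
          have := h2 k hk
          rw [herase_c k] at this
          by_cases he : k = k0
          · exact he ▸ hs
          · rwa [if_neg he] at this
        · intro k hk
          rcases List.mem_cons.mp hk with he | ht
          · cases hout : ((t.foldl pvA_step (rA.insert k0 v, s.erase k0)).2).contains k with
            | false => rfl
            | true =>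
              have h5 := h2 k hout
              rw [herase_c k, if_pos he] at h5
              exact absurd h5 (by simp)
          · exact h3 k ht
    · -- k0 not in the source: both sides leave the state unchanged
      have hs' : s.contains k0 = false := Bool.eq_false_iff.mpr hs
      have hstepA : pvA_step (rA, s) k0 = (rA, s) := by
        simp [pvA_step, hs']
      have hstepB : pvB_fill gvn rB k0 = rB := by
        unfold pvB_fill
        by_cases hgk : gvn.contains k0 = true
        · rw [hcrB k0, hC1 k0 hgk hs']
          simp
        · rw [Bool.eq_false_iff.mpr hgk]
          simp
      rw [hstepA, hstepB]
      obtain ⟨h1, h2, h3⟩ := ih rA s rB h hnodA hC1 hC2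
        (fun k hk => hC4 k (by simp [hk]))
      refine ⟨h1, h2, ?_⟩
      intro k hk
      rcases List.mem_cons.mp hk with he | ht
      · cases hout : ((t.foldl pvA_step (rA, s)).2).contains k with
        | false => rfl
        | true => exact absurd (he ▸ h2 k hout) (by simp [hs'])
      · exact h3 k ht

-- A's '{"method": method, **default_dict}' has unique keys
theorem pv_nodup_result0 (method : String) (default_dict : List (String × String)) :
    (default_dict.foldl (fun d p => d.insert p.1 p.2)
      (PySem.Dict.empty.insert "method" method)).keys.Nodup := by
  have := PySem.Dict.nodup_keys_foldl_insert_key default_dict Prod.fst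
    (fun d p => p.2) (PySem.Dict.empty.insert "method" method)
    (PySem.Dict.nodup_keys_insert _ _ _ (PySem.Dict.nodup_keys_empty))
  exact this

-- ===== VERDICT (by name: the statement is the Claim_ definition above) =====
theorem get_alpha_config_options_py_spec : Claim_equal_get_alpha_config_options_py := by
  intro method keys default_dict given_dict hDom hPre
  unfold Spec_get_alpha_config_options_py
  simp only [get_alpha_config_options_py, get_alpha_config_options_py_alt]
  -- names
  set G : PySem.Dict String String := PySem.Dict.ofList given_dict with hG
  set gvn : PySem.Dict String String :=
    (G.items.foldl (pvB_classify (PySem.Set.ofList keys))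
      (PySem.Dict.empty, PySem.Dict.empty)).1 with hgvn
  set s1 : PySem.Dict String String :=
    (["method", "mode"] : List String).foldl (fun s k => s.erase k) G with hs1
  have hs1e : s1 = (G.erase "method").erase "mode" := by rw [hs1]; rfl
  have hGnod : G.keys.Nodup := PySem.Dict.nodup_keys_ofList given_dict
  have hGnd : (G.items.map Prod.fst).Nodup := by
    simpa [PySem.Dict.keys] using hGnod
  -- characterisations
  have hchar : ∀ k, gvn.get? k
      = if ¬(k = "method" ∨ k = "mode") ∧ k ∈ keys then G.get? k else none := by
    intro k
    rw [hgvn, pv_classify_get? keys G.items hGnd k (PySem.Dict.empty, PySem.Dict.empty)]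
    have hmatch : (match G.items.find? (fun p => p.1 == k) with
        | some p => some p.2
        | none => (PySem.Dict.empty : PySem.Dict String String).get? k) = G.get? k := by
      cases hf : G.items.find? (fun p => p.1 == k) with
      | none => simp [PySem.Dict.get?, PySem.Dict.empty, hf]
      | some q => simp [PySem.Dict.get?, hf]
    rw [hmatch]
    split <;> rfl
  have hs1get : ∀ k, s1.get? k
      = if k = "method" ∨ k = "mode" then none else G.get? k := by
    intro k
    rw [hs1e, pv_get?_erase, pv_get?_erase]
    by_cases h1 : k = "mode"
    · simp [h1]
    · by_cases h2 : k = "method" <;> simp [h1, h2]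
  have hs1c : ∀ k, s1.contains k
      = if k = "method" ∨ k = "mode" then false else G.contains k := by
    intro k
    rw [PySem.Dict.contains_eq_isSome_get?, hs1get k]
    split
    · rfl
    · rw [PySem.Dict.contains_eq_isSome_get?]
  have hgc : ∀ k, gvn.contains k = true →
      (¬(k = "method" ∨ k = "mode") ∧ k ∈ keys) ∧ G.contains k = true := by
    intro k hk
    rw [PySem.Dict.contains_eq_isSome_get?, hchar k] at hk
    by_cases hp : ¬(k = "method" ∨ k = "mode") ∧ k ∈ keys
    · refine ⟨hp, ?_⟩
      rw [if_pos hp] at hk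
      rw [PySem.Dict.contains_eq_isSome_get?]
      exact hk
    · rw [if_neg hp] at hk
      exact absurd hk (by simp)
  have hsub : ∀ k, gvn.contains k = true → s1.contains k = true := by
    intro k hk
    obtain ⟨⟨hm, _⟩, hGc⟩ := hgc k hk
    rw [hs1c k, if_neg hm]
    exact hGc
  -- initial relation for the defaults pass
  have hbase : (PySem.Dict.empty.insert "method" method).items
      = (PySem.Dict.empty.insert "method" method).items.map (pvOw gvn s1) := by
    have : ((PySem.Dict.empty : PySem.Dict String String).insert "method" method).items
        = [("method", method)] := rfl
    rw [this]
    have : pvOw gvn s1 ("method", method) = ("method", method) := by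
      apply pvOw_of_contains_false
      rw [hs1c]; simp
    simp [this]
  have hrel0 := pv_default gvn s1 hsub default_dict
    (PySem.Dict.empty.insert "method" method)
    (PySem.Dict.empty.insert "method" method) hbase
  -- run the simulation over keys
  have hC1 : ∀ k, gvn.contains k = true → s1.contains k = false →
      (default_dict.foldl (fun d p => d.insert p.1 p.2)
        (PySem.Dict.empty.insert "method" method)).contains k = true := by
    intro k hgk hsk
    exact absurd (hsub k hgk) (by simp [hsk])
  have hC2 : ∀ k, s1.contains k = true → gvn.contains k = true →
      s1.get? k = gvn.get? k := by
    intro k hsk hgk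
    obtain ⟨hp, _⟩ := hgc k hgk
    rw [hs1get k, if_neg hp.1, hchar k, if_pos hp]
  have hC4 : ∀ k ∈ keys, s1.contains k = true → gvn.contains k = true := by
    intro k hk hsk
    rw [hs1c k] at hsk
    by_cases hm : k = "method" ∨ k = "mode"
    · rw [if_pos hm] at hsk; exact absurd hsk (by simp)
    · rw [if_neg hm] at hsk
      rw [PySem.Dict.contains_eq_isSome_get?, hchar k, if_pos ⟨hm, hk⟩,
          ← PySem.Dict.contains_eq_isSome_get?]
      exact hsk
  obtain ⟨hfin, hmono, hnotin⟩ := pv_loop gvn keys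
    (default_dict.foldl (fun d p => d.insert p.1 p.2)
      (PySem.Dict.empty.insert "method" method)) s1
    (default_dict.foldl (fun d p => d.insert p.1 (gvn.getD p.1 p.2))
      (PySem.Dict.empty.insert "method" method))
    hrel0 (pv_nodup_result0 method default_dict) hC1 hC2 hC4
  -- conclude: the final pvOw is the identity on every final result entry
  rw [hfin]
  have hid : ∀ p ∈ (keys.foldl pvA_step
      (default_dict.foldl (fun d p => d.insert p.1 p.2)
        (PySem.Dict.empty.insert "method" method), s1)).1.items,
      pvOw gvn ((keys.foldl pvA_step
        (default_dict.foldl (fun d p => d.insert p.1 p.2)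
          (PySem.Dict.empty.insert "method" method), s1)).2) p = p := by
    intro p hp
    unfold pvOw
    by_cases hg : gvn.contains p.1 = true
    · obtain ⟨⟨hm, hkmem⟩, _⟩ := hgc p.1 hg
      rw [hnotin p.1 hkmem]
      simp
    · rw [Bool.eq_false_iff.mpr hg]
      simp
  rw [List.map_congr_left hid, List.map_id']
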